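-- pv_equiv track=rewrite | github.com/yallapragada/rmt | src/rmt_flu.py | filter_strains
-- ===== SOURCE A (Python) =====
-- from collections import Counter
--
-- def filter_strains(data):
--     """ Filters out strains that are sufficiently different from the rest
--     """
--     length_counter = Counter([len(strain) for strain in data])
--     most_common = length_counter.most_common()[0][0]
--
--     # Collect only strains that are the right length into the return variable
--     good_data = []
--     for sequence in data:
--         if len(sequence) == most_common:
--             good_data.append(sequence)
--
--     return good_data
-- ===== SOURCE B (Python) =====
-- def filter_strains(data):
--     """ Filters out strains that are sufficiently different from the rest
--     """
--     groups = {}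
--     for sequence in data:
--         groups.setdefault(len(sequence), []).append(sequence)
--     best = max(groups, key=lambda k: len(groups[k]))
--     return groups[best]
-- ===== Notes on version B (the rewrite author's own statement) =====
-- stated objective: alternative
-- what changed: Replaces Counter-of-lengths plus most_common() and a separate filtering loop by a single grouping pass into length buckets, picking the key with the longest bucket (same first-appearance tie-break) and returning that bucket directly.
-- outside the precondition, e.g. on filter_strains([]): A raises IndexError, B raises ValueError
import Mathlib
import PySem

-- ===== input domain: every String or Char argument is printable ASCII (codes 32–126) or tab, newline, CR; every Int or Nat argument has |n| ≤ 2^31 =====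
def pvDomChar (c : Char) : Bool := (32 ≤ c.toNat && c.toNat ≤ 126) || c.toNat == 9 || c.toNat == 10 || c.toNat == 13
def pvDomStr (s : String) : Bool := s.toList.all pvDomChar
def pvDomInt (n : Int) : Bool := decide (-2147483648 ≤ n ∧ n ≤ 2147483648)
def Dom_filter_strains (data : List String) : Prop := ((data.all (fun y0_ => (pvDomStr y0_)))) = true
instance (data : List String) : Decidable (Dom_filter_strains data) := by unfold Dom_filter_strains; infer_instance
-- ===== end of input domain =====

-- B replaces the Counter + most_common() sort + rescan by one grouping pass into
-- length buckets and returns the longest bucket (same first-appearance tie-break).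


-- ===== PORT A =====
-- Counter(len(strain) for strain in data); most_common() is sorted(items, key=count, reverse=True)
def filter_strains (data : List String) : List String :=
  let length_counter : PySem.Dict Int Int :=
    PySem.Dict.counter (data.map (fun strain => PySem.Str.len strain))
  match PySem.List.pyGet?
      (PySem.List.sorted length_counter.items (fun kv => kv.2) true) 0 with
  | none => []   -- empty data: Python raises IndexError; excluded by Pre_
  | some mc =>
    data.foldl
      (fun good_data sequence =>
        if PySem.Str.len sequence = mc.1 then good_data ++ [sequence] else good_data)
      []

-- ===== PORT B =====
def filter_strains_alt (data : List String) : List String :=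
  let groups : PySem.Dict Int (List String) :=
    data.foldl
      (fun d sequence => d.modify (PySem.Str.len sequence) [] (fun l => l ++ [sequence]))
      PySem.Dict.empty
  match PySem.List.max? groups.keys (fun k => ((groups.getD k []).length : Int)) with
  | none => []   -- empty data: Python raises ValueError; excluded by Pre_
  | some best => groups.getD best []

-- ===== PRECONDITION & SPEC =====
-- A raises IndexError (and B ValueError) on empty data: excluded.
def Pre_filter_strains (data : List String) : Prop := data ≠ []
instance (data : List String) : Decidable (Pre_filter_strains data) := by
  unfold Pre_filter_strains; infer_instance
def pvWitness_filter_strains : List String := ["ACGT", "AC", "GGTT"]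
def Spec_filter_strains (data : List String) (out : List String) : Prop :=
  out = filter_strains_alt data
instance (data : List String) (out : List String) : Decidable (Spec_filter_strains data out) := by
  unfold Spec_filter_strains; infer_instance

-- ===== CLAIM (what is proved, stated in full; the proofs are below) =====
def Claim_equal_filter_strains : Prop := ∀ (data : List String), Dom_filter_strains data → Pre_filter_strains data → Spec_filter_strains data (filter_strains data)

-- ===== LEMMAS AND PROOFS =====

-- head of a stable descending sort is Python's max (first maximal element)
theorem head_insertBy_rev {α κ : Type} [LinearOrder κ] (key : α → κ) (x : α) (l : List α) :
    (PySem.List.insertBy (fun a b => decide (key b < key a)) x l).head? =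
      some (match l.head? with
            | none => x
            | some m => if key m < key x then x else m) := by
  cases l with
  | nil => simp [PySem.List.insertBy]
  | cons y ys =>
    by_cases h : key y < key x <;> simp [PySem.List.insertBy, h]

theorem head_sorted_rev_eq_max? {α κ : Type} [LinearOrder κ] (xs : List α) (key : α → κ) :
    (PySem.List.sorted xs key true).head? = PySem.List.max? xs key := by
  rw [PySem.List.sorted_rev_eq_foldl_insertBy]
  suffices h : ∀ (acc : List α),
      (xs.foldl (fun acc x => PySem.List.insertBy (fun a b => decide (key b < key a)) x acc) acc).head? =
        xs.foldl (fun acc x =>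
          match acc with
          | none => some x
          | some m => if key m < key x then some x else some m) acc.head? by
    exact h []
  induction xs with
  | nil => intro acc; rfl
  | cons x t ih =>
    intro acc
    rw [List.foldl_cons, List.foldl_cons, ih, head_insertBy_rev]
    cases acc <;> simp
    split_ifs <;> rfl

-- Python's max over a mapped list
theorem max?_map {α β κ : Type} [LinearOrder κ] (g : α → β) (key : β → κ) (l : List α) :
    PySem.List.max? (l.map g) key = Option.map g (PySem.List.max? l (fun x => key (g x))) := by
  show (l.map g).foldl _ none = _
  rw [List.foldl_map]
  suffices h : ∀ (acc : Option α),
      l.foldl (fun acc x =>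
        match acc with
        | none => some (g x)
        | some m => if key m < key (g x) then some (g x) else some m) (Option.map g acc) =
      Option.map g (l.foldl (fun acc x =>
        match acc with
        | none => some x
        | some m => if key (g m) < key (g x) then some x else some m) acc) by
    exact h none
  induction l with
  | nil => intro acc; rfl
  | cons x t ih =>
    intro acc
    cases acc with
    | none => exact ih (some x)
    | some m =>
      simp only [List.foldl_cons, Option.map_some]
      by_cases h : key (g m) < key (g x)
      · simpa [h] using ih (some x)
      · simpa [h] using ih (some m)

theorem max?_congr_key {α κ : Type} [LT κ] [DecidableLT κ] (l : List α) (k₁ k₂ : α → κ)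
    (h : ∀ x, k₁ x = k₂ x) : PySem.List.max? l k₁ = PySem.List.max? l k₂ := by
  have : k₁ = k₂ := funext h
  rw [this]

-- the bucket of k holds exactly the strains of length k, in order
theorem groups_getD (data : List String) (k : Int) :
    (data.foldl
        (fun d sequence => d.modify (PySem.Str.len sequence) [] (fun l => l ++ [sequence]))
        (PySem.Dict.empty : PySem.Dict Int (List String))).getD k [] =
      data.filter (fun s => PySem.Str.len s == k) := by
  have h1 : data.foldl
      (fun d sequence => d.modify (PySem.Str.len sequence) [] (fun l => l ++ [sequence]))
      (PySem.Dict.empty : PySem.Dict Int (List String)) =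
      (data.map (fun s => (PySem.Str.len s, s))).foldl
      (fun d p => d.modify p.1 [] (fun l => l ++ [p.2])) PySem.Dict.empty := by
    rw [List.foldl_map]
  rw [h1, PySem.Dict.getD_foldl_modify_append, List.filter_map]
  simp [Function.comp_def]

theorem groups_keys (data : List String) :
    (data.foldl
        (fun d sequence => d.modify (PySem.Str.len sequence) [] (fun l => l ++ [sequence]))
        (PySem.Dict.empty : PySem.Dict Int (List String))).keys =
      PySem.Set.ofList (data.map PySem.Str.len) := by
  rw [PySem.Dict.keys_foldl_modify_key data PySem.Str.len [] (fun _ s l => l ++ [s])]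
  rfl

-- ===== VERDICT (by name: the statement is the Claim_ definition above) =====
theorem filter_strains_spec : Claim_equal_filter_strains := by
  intro data _ hpre
  unfold Spec_filter_strains filter_strains filter_strains_alt
  simp only []
  set lens := data.map PySem.Str.len with hlens
  set groups :=
    data.foldl
      (fun d sequence => d.modify (PySem.Str.len sequence) [] (fun l => l ++ [sequence]))
      (PySem.Dict.empty : PySem.Dict Int (List String)) with hgroups
  -- both selectors agree
  have hkeys : groups.keys = PySem.Set.ofList lens := groups_keys data
  have hcount : ∀ k : Int, ((groups.getD k []).length : Int) = (lens.count k : Int) := by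
    intro k
    rw [groups_getD data k, hlens]
    congr 1
    rw [List.count_eq_countP, List.countP_map, ← List.countP_eq_length_filter]
    simp [Function.comp_def]
  have hsel :
      (PySem.List.sorted (PySem.Dict.counter lens).items (fun kv => kv.2) true).head? =
        Option.map (fun k => (k, (lens.count k : Int)))
          (PySem.List.max? groups.keys (fun k => ((groups.getD k []).length : Int))) := by
    rw [head_sorted_rev_eq_max?, PySem.Dict.items_counter,
        max?_map (fun k => (k, (lens.count k : Int))) (fun kv => kv.2) (PySem.Set.ofList lens),
        hkeys, max?_congr_key _ _ _ hcount]
  -- nonemptiness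
  have hlne : lens ≠ [] := by
    intro h; exact hpre (List.map_eq_nil_iff.mp h)
  have hofl : ∀ l : List Int, PySem.Set.ofList l = [] → l = [] := by
    intro l h
    cases l with
    | nil => rfl
    | cons a t =>
      exfalso
      have ha : a ∈ PySem.Set.ofList (a :: t) := by
        rw [PySem.Set.mem_ofList]; exact List.mem_cons_self
      rw [h] at ha; exact List.not_mem_nil ha
  have hsne : (PySem.List.sorted (PySem.Dict.counter lens).items (fun kv => kv.2) true) ≠ [] := by
    rw [Ne, PySem.List.sorted_eq_nil_iff, PySem.Dict.items_counter]
    simp only [List.map_eq_nil_iff]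
    intro h
    exact hlne (hofl _ h)
  obtain ⟨hd, tl, hcons⟩ := List.exists_cons_of_ne_nil hsne
  have hget : PySem.List.pyGet?
      (PySem.List.sorted (PySem.Dict.counter lens).items (fun kv => kv.2) true) 0 =
      (PySem.List.sorted (PySem.Dict.counter lens).items (fun kv => kv.2) true).head? := by
    rw [hcons]
    unfold PySem.List.pyGet? PySem.List.pyIdx?
    norm_num
  rw [hget, hsel]
  cases hmax : PySem.List.max? groups.keys (fun k => ((groups.getD k []).length : Int)) with
  | none =>
    exfalso
    rw [PySem.List.max?_eq_none_iff] at hmax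
    rw [hkeys] at hmax
    exact hlne (hofl _ hmax)
  | some best =>
    simp only [Option.map_some]
    rw [groups_getD data best,
        PySem.List.foldl_append_ite_eq_filter (p := fun s => PySem.Str.len s = best)]
    simp only [List.nil_append]
    exact List.filter_congr (fun s _ => Eq.symm (Bool.beq_eq_decide_eq _ _))
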